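-- pv_equiv track=rewrite | github.com/posl/comment_recommendation | script/split_gen/4_time/zh/099_B/8.py | get_hight
-- ===== SOURCE A (Python) =====
-- def get_hight(a,b):
--     if a >= b:
--         return -1
--     sum = 0
--     for i in range(1,1000):
--         sum = sum + i
--         if sum >= a:
--             break
--     if sum != a:
--         return -1
--     sum = 0
--     for i in range(1,1000):
--         sum = sum + i
--         if sum >= b:
--             break
--     if sum != b:
--         return -1
--     return b - a
-- ===== SOURCE B (Python) =====
-- def _is_tri(x):
--     # triangular numbers T_1..T_999 (A's loop cap); binary search for least n with T_n >= x
--     if x < 1 or x > 499500: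
--         return False
--     lo, hi = 1, 999
--     while lo < hi:
--         mid = (lo + hi) // 2
--         if mid * (mid + 1) // 2 < x:
--             lo = mid + 1
--         else:
--             hi = mid
--     return lo * (lo + 1) // 2 == x
--
-- def get_hight(a, b):
--     if a >= b:
--         return -1
--     if _is_tri(a) and _is_tri(b):
--         return b - a
--     return -1
-- ===== Notes on version B (the rewrite author's own statement) =====
-- stated objective: alternative
-- what changed: Replaces A's two linear accumulation loops (summing 1..999 until the sum reaches the argument) by a binary search over n in [1,999] for the least n with n(n+1)/2 >= x, testing triangularity in O(log n) instead of O(n).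
import Mathlib
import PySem

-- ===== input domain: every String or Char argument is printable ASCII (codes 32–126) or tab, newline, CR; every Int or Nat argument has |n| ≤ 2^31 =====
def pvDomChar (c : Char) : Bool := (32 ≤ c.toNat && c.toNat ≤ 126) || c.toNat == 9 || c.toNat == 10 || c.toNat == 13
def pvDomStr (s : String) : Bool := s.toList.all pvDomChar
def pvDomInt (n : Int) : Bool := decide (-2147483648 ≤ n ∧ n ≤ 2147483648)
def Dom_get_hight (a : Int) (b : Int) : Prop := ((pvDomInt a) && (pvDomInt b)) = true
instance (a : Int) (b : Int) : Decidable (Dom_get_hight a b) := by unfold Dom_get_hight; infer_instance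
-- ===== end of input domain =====

-- B replaces A's linear accumulation loops by a binary search for the least n ≤ 999
-- with n(n+1)/2 ≥ x (objective: alternative algorithm; return value only, no side effects).

-- ===== PORT A =====
-- A's loop 'for i in range(1,1000): sum += i; if sum >= a: break' as structural
-- recursion on the remaining iterations (i runs 1..999, early exit when sum ≥ a).
def loopA (a : Int) (i : Nat) (sum : Int) : Int :=
  if i ≥ 1000 then sum
  else
    let s := sum + (i : Int)
    if s ≥ a then s else loopA a (i + 1) s
termination_by 1000 - i

def get_hight (a : Int) (b : Int) : Int :=
  if a ≥ b then -1
  else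
    let s1 := loopA a 1 0
    if s1 ≠ a then -1
    else
      let s2 := loopA b 1 0
      if s2 ≠ b then -1
      else b - a

-- ===== PORT B =====
-- binary search over Nat indices; all Python ints involved are nonnegative, so
-- Nat arithmetic (including // = Nat division) is exact here.
def bsearch (x : Int) (lo hi : Nat) : Nat :=
  if lo < hi then
    let mid := (lo + hi) / 2
    if ((mid * (mid + 1) / 2 : Nat) : Int) < x then bsearch x (mid + 1) hi
    else bsearch x lo mid
  else lo
termination_by hi - lo

def is_tri (x : Int) : Bool :=
  if x < 1 ∨ x > 499500 then false
  else
    let n := bsearch x 1 999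
    ((n * (n + 1) / 2 : Nat) : Int) == x

def get_hight_alt (a : Int) (b : Int) : Int :=
  if a ≥ b then -1
  else if is_tri a && is_tri b then b - a
  else -1

-- ===== PRECONDITION & SPEC =====
def Spec_get_hight (a : Int) (b : Int) (out : Int) : Prop := out = get_hight_alt a b
instance (a : Int) (b : Int) (out : Int) : Decidable (Spec_get_hight a b out) := by unfold Spec_get_hight; infer_instance

-- ===== CLAIM (what is proved, stated in full; the proofs are below) =====
def Claim_equal_get_hight : Prop := ∀ (a : Int) (b : Int), Dom_get_hight a b → Spec_get_hight a b (get_hight a b)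

-- ===== LEMMAS AND PROOFS =====

-- the n-th triangular number, as an Int
def T (n : Nat) : Int := ((n * (n + 1) / 2 : Nat) : Int)

-- "x is one of the triangular numbers A's capped loop can produce"
def IsTri (x : Int) : Prop := ∃ n : Nat, 1 ≤ n ∧ n ≤ 999 ∧ T n = x

theorem T_succ (n : Nat) : T (n + 1) = T n + (n + 1 : Nat) := by
  unfold T
  have h : (n + 1) * (n + 1 + 1) = n * (n + 1) + 2 * (n + 1) := by ring
  rw [h]
  have h2 : (n * (n + 1) + 2 * (n + 1)) / 2 = n * (n + 1) / 2 + (n + 1) := by omega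
  rw [h2]; push_cast; ring

theorem T_mono {n m : Nat} (h : n ≤ m) : T n ≤ T m := by
  unfold T
  have : n * (n + 1) ≤ m * (m + 1) := Nat.mul_le_mul h (by omega)
  exact_mod_cast Nat.div_le_div_right this

theorem T_zero : T 0 = 0 := by decide
theorem T_one : T 1 = 1 := by decide
theorem T_999 : T 999 = 499500 := by decide

theorem T_ge_one {n : Nat} (h : 1 ≤ n) : 1 ≤ T n := by
  have := T_mono h; rw [T_one] at this; omega

-- characterization of A's loop: starting at step i with sum = T (i-1) < a,
-- the loop returns a iff some triangular number T n with i ≤ n ≤ 999 equals a.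
theorem loopA_eq (k : Nat) : ∀ i : Nat, i + k = 1000 → 1 ≤ i → ∀ a : Int, T (i - 1) < a →
    ((loopA a i (T (i - 1)) = a) ↔ ∃ n : Nat, i ≤ n ∧ n ≤ 999 ∧ T n = a) := by
  induction k with
  | zero =>
    intro i hi h1 a ha
    have hi' : i = 1000 := by omega
    subst hi'
    rw [loopA]
    simp only [ge_iff_le, le_refl, if_pos]
    constructor
    · intro h; omega
    · rintro ⟨n, hn1, hn2, _⟩; omega
  | succ k ih =>
    intro i hi h1 a ha
    have hlt : ¬ i ≥ 1000 := by omega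
    rw [loopA]
    simp only [hlt, if_false]
    have hstep : T (i - 1) + (i : Int) = T i := by
      have h2 : i - 1 + 1 = i := by omega
      have := T_succ (i - 1); rw [h2] at this
      rw [this]
    rw [hstep]
    by_cases hge : T i ≥ a
    · simp only [hge, if_pos]
      constructor
      · intro h; exact ⟨i, le_refl i, by omega, h⟩
      · rintro ⟨n, hn1, hn2, hn3⟩
        have := T_mono hn1
        omega
    · simp only [hge, if_false]
      push Not at hge
      have h2 : (i + 1) - 1 = i := by omega
      have := ih (i + 1) (by omega) (by omega) a (by rw [h2]; exact hge)
      rw [h2] at this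
      rw [this]
      constructor
      · rintro ⟨n, hn1, hn2, hn3⟩; exact ⟨n, by omega, hn2, hn3⟩
      · rintro ⟨n, hn1, hn2, hn3⟩
        refine ⟨n, ?_, hn2, hn3⟩
        rcases Nat.eq_or_lt_of_le hn1 with h | h
        · subst h; omega
        · omega

-- top-level characterization of A's triangularity test
theorem loopA_char (a : Int) : (loopA a 1 0 = a) ↔ IsTri a := by
  by_cases ha : 1 ≤ a
  · have := loopA_eq 999 1 (by omega) (by omega) a
      (by rw [show ((1:Nat) - 1) = 0 from rfl, T_zero]; omega)
    simpa [T_zero, IsTri] using this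
  · push Not at ha
    rw [loopA]
    have : ¬ (1 : Nat) ≥ 1000 := by omega
    simp only [this, if_false]
    have hge : (0 : Int) + (1 : Nat) ≥ a := by push_cast; omega
    simp only [hge, if_pos]
    constructor
    · intro h; omega
    · rintro ⟨n, hn1, _, hn3⟩
      have := T_ge_one hn1; omega

-- binary-search invariant: result is the least n in [lo,hi] with T n ≥ x
theorem bsearch_spec (k : Nat) : ∀ lo hi : Nat, hi - lo ≤ k → lo ≤ hi → ∀ x : Int, T hi ≥ x →
    lo ≤ bsearch x lo hi ∧ bsearch x lo hi ≤ hi ∧ T (bsearch x lo hi) ≥ x ∧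
      ∀ m : Nat, lo ≤ m → m < bsearch x lo hi → T m < x := by
  induction k with
  | zero =>
    intro lo hi hk hle x hx
    have : lo = hi := by omega
    subst this
    rw [bsearch]
    simp only [lt_irrefl, if_false]
    exact ⟨le_refl _, le_refl _, hx, fun m h1 h2 => by omega⟩
  | succ k ih =>
    intro lo hi hk hle x hx
    rw [bsearch]
    by_cases hlt : lo < hi
    · simp only [hlt, if_pos]
      set mid := (lo + hi) / 2 with hmid
      have hm1 : lo ≤ mid := by omega
      have hm2 : mid < hi := by omega
      by_cases hc : ((mid * (mid + 1) / 2 : Nat) : Int) < x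
      · simp only [hc, if_pos]
        have hTc : T mid < x := hc
        obtain ⟨r1, r2, r3, r4⟩ := ih (mid + 1) hi (by omega) (by omega) x hx
        refine ⟨by omega, r2, r3, fun m h1 h2 => ?_⟩
        by_cases hmm : m ≤ mid
        · exact lt_of_le_of_lt (T_mono hmm) hTc
        · exact r4 m (by omega) h2
      · simp only [hc, if_false]
        push Not at hc
        obtain ⟨r1, r2, r3, r4⟩ := ih lo mid (by omega) (by omega) x hc
        exact ⟨r1, by omega, r3, r4⟩
    · simp only [hlt, if_false]
      have : lo = hi := by omega
      subst this
      exact ⟨le_refl _, le_refl _, hx, fun m h1 h2 => by omega⟩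

-- B's triangularity test agrees with IsTri
theorem is_tri_char (x : Int) : is_tri x = true ↔ IsTri x := by
  unfold is_tri
  by_cases hout : x < 1 ∨ x > 499500
  · simp only [hout, if_pos]
    constructor
    · intro h; exact absurd h (by simp)
    · rintro ⟨n, hn1, hn2, hn3⟩
      have h1 := T_ge_one hn1
      have h2 := T_mono hn2
      rw [T_999] at h2
      omega
  · simp only [hout, if_false]
    push Not at hout
    obtain ⟨hx1, hx2⟩ := hout
    have hx999 : T 999 ≥ x := by rw [T_999]; omega
    obtain ⟨r1, r2, r3, r4⟩ := bsearch_spec 998 1 999 (by omega) (by omega) x hx999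
    set n := bsearch x 1 999 with hn
    constructor
    · intro h
      have : T n = x := by
        have := beq_iff_eq.mp h
        exact this
      exact ⟨n, r1, r2, this⟩
    · rintro ⟨m, hm1, hm2, hm3⟩
      have hnm : n ≤ m := by
        by_contra hc
        push Not at hc
        have := r4 m hm1 hc
        omega
      have h1 : T n ≤ T m := T_mono hnm
      have : T n = x := by rw [hm3] at h1; omega
      exact beq_iff_eq.mpr this

-- ===== VERDICT (by name: the statement is the Claim_ definition above) =====
theorem get_hight_spec : Claim_equal_get_hight := by
  intro a b _
  unfold Spec_get_hight get_hight get_hight_alt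
  by_cases hab : a ≥ b
  · simp [hab]
  · simp only [hab, if_false]
    by_cases hA : IsTri a
    · have ha : loopA a 1 0 = a := (loopA_char a).mpr hA
      have ha' : is_tri a = true := (is_tri_char a).mpr hA
      by_cases hB : IsTri b
      · have hb : loopA b 1 0 = b := (loopA_char b).mpr hB
        have hb' : is_tri b = true := (is_tri_char b).mpr hB
        simp [ha, hb, ha', hb']
      · have hb : loopA b 1 0 ≠ b := fun h => hB ((loopA_char b).mp h)
        have hb' : is_tri b = false := by
          cases h : is_tri b
          · rfl
          · exact absurd ((is_tri_char b).mp h) hB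
        simp [ha, hb, ha', hb']
    · have ha : loopA a 1 0 ≠ a := fun h => hA ((loopA_char a).mp h)
      have ha' : is_tri a = false := by
        cases h : is_tri a
        · rfl
        · exact absurd ((is_tri_char a).mp h) hA
      simp [ha, ha']
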